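-- pv_equiv track=rewrite | github.com/BKuliesis/Dynamic-Noughts-and-Crosses-AI | utility.py | get_starting_win_length
-- ===== SOURCE A (Python) =====
-- def fibonacci_from_two(n):
--     if n == 1:
--         return 2
--     elif n == 2:
--         return 3
--     elif n > 2:
--         return fibonacci_from_two(n - 1) + fibonacci_from_two(n - 2)
--
-- def get_starting_win_length(grid_size):
--     temp_size = 2
--     n = 1
--     while True:
--         for size in range(fibonacci_from_two(n)):
--             temp_size += 1
--             if temp_size == grid_size:
--                 return grid_size - n + 1
--         n += 1
-- ===== SOURCE B (Python) =====
-- def get_starting_win_length(grid_size):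
--     # Iterative fibonacci with a running cumulative bound to locate the block.
--     bound, a, b, n = 2, 2, 3, 1
--     while True:
--         bound += a
--         if grid_size <= bound:
--             return grid_size - n + 1
--         a, b = b, a + b
--         n += 1
-- ===== Notes on version B (the rewrite author's own statement) =====
-- stated objective: faster
-- what changed: Replaces the naive exponential recursive fibonacci (recomputed for every outer block) and per-cell inner counting loop with an iterative fibonacci pair and a running cumulative bound, returning as soon as grid_size falls inside the current block.
-- outside the precondition, e.g. on get_starting_win_length(2): A does not finish within the time limit, B returns 2
import Mathlib
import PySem

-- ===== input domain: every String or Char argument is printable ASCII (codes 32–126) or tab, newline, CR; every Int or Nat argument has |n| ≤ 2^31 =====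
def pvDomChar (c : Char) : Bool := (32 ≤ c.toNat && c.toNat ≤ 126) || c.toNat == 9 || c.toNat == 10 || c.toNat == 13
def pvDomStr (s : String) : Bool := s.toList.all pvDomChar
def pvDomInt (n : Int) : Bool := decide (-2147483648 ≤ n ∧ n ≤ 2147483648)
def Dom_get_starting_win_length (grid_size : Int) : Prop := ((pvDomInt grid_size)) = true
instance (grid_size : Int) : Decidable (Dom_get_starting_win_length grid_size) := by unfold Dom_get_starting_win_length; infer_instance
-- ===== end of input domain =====

-- B replaces A's exponential recursive fibonacci + per-cell counting loop with an
-- iterative fibonacci pair and a running cumulative bound (faster, asymptotically).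


-- ===== PORT A =====
-- naive recursive fibonacci_from_two; n = 0 is unreachable in A (Python would return None)
def fibTwo : Nat → Int
  | 0 => 0
  | 1 => 2
  | 2 => 3
  | n + 3 => fibTwo (n + 2) + fibTwo (n + 1)

-- the 'for size in range(fibonacci_from_two(n))' body: increment temp, return on hit
def innerA (grid_size : Int) (n : Nat) : Int → Nat → Option Int × Int
  | temp, 0 => (none, temp)
  | temp, count + 1 =>
    let temp' := temp + 1
    if temp' = grid_size then (some (grid_size - (n : Int) + 1), temp')
    else innerA grid_size n temp' count

-- the 'while True' loop; fuel makes it total (A diverges for grid_size ≤ 2, outside Pre_)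
def loopA (grid_size : Int) : Nat → Int → Nat → Int
  | 0, _, _ => 0
  | fuel + 1, temp, n =>
    match innerA grid_size n temp (fibTwo n).toNat with
    | (some r, _) => r
    | (none, temp') => loopA grid_size fuel temp' (n + 1)

def get_starting_win_length (grid_size : Int) : Int :=
  loopA grid_size (grid_size.toNat + 1) 2 1

-- ===== PORT B =====
-- iterative fibonacci pair (a, b) with running cumulative bound; fuel for totality
def loopB (grid_size : Int) : Nat → Int → Int → Int → Nat → Int
  | 0, _, _, _, _ => 0
  | fuel + 1, bound, a, b, n =>
    let bound' := bound + a
    if grid_size ≤ bound' then grid_size - (n : Int) + 1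
    else loopB grid_size fuel bound' b (a + b) (n + 1)

def get_starting_win_length_alt (grid_size : Int) : Int :=
  loopB grid_size (grid_size.toNat + 1) 2 2 3 1

-- ===== PRECONDITION & SPEC =====
-- Pre_ excludes grid_size ≤ 2, on which Python A loops forever (never returns).
def Pre_get_starting_win_length (grid_size : Int) : Prop := 3 ≤ grid_size
instance (grid_size : Int) : Decidable (Pre_get_starting_win_length grid_size) := by
  unfold Pre_get_starting_win_length; infer_instance
def pvWitness_get_starting_win_length : Int := 5

def Spec_get_starting_win_length (grid_size : Int) (out : Int) : Prop := out = get_starting_win_length_alt grid_size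
instance (grid_size : Int) (out : Int) : Decidable (Spec_get_starting_win_length grid_size out) := by unfold Spec_get_starting_win_length; infer_instance

-- ===== CLAIM (what is proved, stated in full; the proofs are below) =====
def Claim_equal_get_starting_win_length : Prop := ∀ (grid_size : Int), Dom_get_starting_win_length grid_size → Pre_get_starting_win_length grid_size → Spec_get_starting_win_length grid_size (get_starting_win_length grid_size)

-- ===== LEMMAS AND PROOFS =====
lemma fibTwo_ge (n : Nat) : 2 ≤ fibTwo (n + 1) := by
  induction n using Nat.strong_induction_on with
  | _ n ih =>
    match n with
    | 0 => simp [fibTwo]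
    | 1 => norm_num [fibTwo]
    | m + 2 =>
      have h1 : 2 ≤ fibTwo (m + 2) := ih (m + 1) (by omega)
      have h2 : 2 ≤ fibTwo (m + 1) := ih m (by omega)
      show 2 ≤ fibTwo (m + 2) + fibTwo (m + 1)
      omega

-- inner loop characterisation, for temp strictly below grid_size
lemma innerA_eq (g : Int) (n : Nat) : ∀ (count : Nat) (temp : Int), temp < g →
    innerA g n temp count =
      if g ≤ temp + count then (some (g - (n : Int) + 1), g)
      else (none, temp + count) := by
  intro count
  induction count with
  | zero => intro temp h; simp [innerA]; omega
  | succ k ih =>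
    intro temp h
    simp only [innerA]
    by_cases hh : temp + 1 = g
    · simp [hh]; omega
    · rw [if_neg hh, ih (temp + 1) (by omega),
        show temp + 1 + (k : Int) = temp + ((k : Int) + 1) from by ring]
      push_cast
      rfl

-- the two loops agree step for step while temp < grid_size
lemma loop_eq (g : Int) : ∀ (fuel : Nat) (temp : Int) (n : Nat), temp < g →
    loopA g fuel temp (n + 1) = loopB g fuel temp (fibTwo (n + 1)) (fibTwo (n + 2)) (n + 1) := by
  intro fuel
  induction fuel with
  | zero => intros; rfl
  | succ f ih =>
    intro temp n h
    have hfib := fibTwo_ge n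
    have htn : ((fibTwo (n + 1)).toNat : Int) = fibTwo (n + 1) := Int.toNat_of_nonneg (by omega)
    simp only [loopA, loopB]
    rw [innerA_eq g (n + 1) _ temp h, htn]
    by_cases hle : g ≤ temp + fibTwo (n + 1)
    · rw [if_pos hle, if_pos hle]
    · rw [if_neg hle, if_neg hle]
      have hsum : fibTwo (n + 1) + fibTwo (n + 2) = fibTwo (n + 1 + 2) := by
        show _ = fibTwo (n + 2) + fibTwo (n + 1)
        exact add_comm _ _
      show loopA g f (temp + fibTwo (n + 1)) (n + 1 + 1) = _
      rw [hsum]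
      exact ih (temp + fibTwo (n + 1)) (n + 1) (by omega)

-- ===== VERDICT (by name: the statement is the Claim_ definition above) =====
theorem get_starting_win_length_spec : Claim_equal_get_starting_win_length := by
  intro g _ hpre
  unfold Spec_get_starting_win_length get_starting_win_length get_starting_win_length_alt
  have h2 : (2 : Int) < g := by exact lt_of_lt_of_le (by norm_num) hpre
  have := loop_eq g (g.toNat + 1) 2 0 h2
  simpa [fibTwo] using this
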